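-- pv_equiv track=rewrite | github.com/PrabhatKushwaha5/DSA_Using-_Python | 1Companies/TCS/TCSSeason13P1.py | can_form_by_one_cut_insert
-- ===== SOURCE A (Python) =====
-- def can_form_by_one_cut_insert(shuffled, original):
--     N = len(shuffled)
--     if shuffled == original:
--         return True
--     for l in range(N):
--         for r in range(l, N):
--             segment = shuffled[l:r+1]
--             remaining = shuffled[:l] + shuffled[r+1:]
--             for i in range(len(remaining)+1):
--                 candidate = remaining[:i] + segment + remaining[i:]
--                 if candidate == original:
--                     return True
--     return False
-- ===== SOURCE B (Python) =====
-- def can_form_by_one_cut_insert(shuffled, original):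
--     n = len(shuffled)
--     if n != len(original):
--         return False
--     if shuffled == original:
--         return True
--     p = 0
--     while p < n and shuffled[p] == original[p]:
--         p += 1
--     q = 0
--     while q < n and shuffled[n - 1 - q] == original[n - 1 - q]:
--         q += 1
--     for a in range(p + 1):
--         for b in range(q + 1):
--             s_mid = shuffled[a:n - b]
--             o_mid = original[a:n - b]
--             if o_mid in s_mid + s_mid:
--                 return True
--     return False
-- ===== Notes on version B (the rewrite author's own statement) =====
-- stated objective: faster
-- what changed: Instead of enumerating every cut segment and every reinsertion point and rebuilding a candidate string for each (A), B strips a common prefix/suffix of each admissible length (bounded by the maximal ones) and tests whether the remaining middles are rotations of each other via one substring-of-doubled-string test.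
import Mathlib
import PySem

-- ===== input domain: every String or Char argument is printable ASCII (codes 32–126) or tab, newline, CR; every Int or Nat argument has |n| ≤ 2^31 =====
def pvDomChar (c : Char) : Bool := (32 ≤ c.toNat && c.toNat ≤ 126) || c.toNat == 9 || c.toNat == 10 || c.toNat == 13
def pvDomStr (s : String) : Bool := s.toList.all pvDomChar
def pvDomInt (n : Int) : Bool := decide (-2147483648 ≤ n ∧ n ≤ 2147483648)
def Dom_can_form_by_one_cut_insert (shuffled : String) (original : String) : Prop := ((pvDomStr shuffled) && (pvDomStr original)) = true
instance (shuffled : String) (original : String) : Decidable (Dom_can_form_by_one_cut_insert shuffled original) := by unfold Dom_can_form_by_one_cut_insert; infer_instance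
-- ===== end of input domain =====

-- B replaces A's enumeration of every (cut, reinsertion) candidate string by: strip a common
-- prefix/suffix of each length up to the maximal ones and test whether the remaining middles are
-- rotations of each other via one substring-of-doubled-string test (measurably faster).

-- ===== PORT A =====
-- literal transliteration of A on the character lists (each for-loop with early `return True`
-- becomes `.any` over the same pyRange; slices and concatenations are the same values)
def pvACore (s t : List Char) : Bool :=
  let N : Int := s.length
  if s = t then true
  else
    (PySem.List.pyRange 0 N 1).any (fun l =>
      (PySem.List.pyRange l N 1).any (fun r =>
        let segment := PySem.List.slice s (some l) (some (r + 1))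
        let remaining := PySem.List.slice s none (some l) ++ PySem.List.slice s (some (r + 1)) none
        (PySem.List.pyRange 0 ((remaining.length : Int) + 1) 1).any (fun i =>
          PySem.List.slice remaining none (some i) ++ segment ++ PySem.List.slice remaining (some i) none = t)))

def can_form_by_one_cut_insert (shuffled : String) (original : String) : Bool :=
  pvACore shuffled.toList original.toList

-- ===== PORT B =====
-- the `while p < n and shuffled[p] == original[p]` counting loop, as structural recursion
def pvPrefLen (s t : List Char) : Nat :=
  match s, t with
  | a :: s', b :: t' => if a = b then pvPrefLen s' t' + 1 else 0
  | _, _ => 0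

def pvBCore (s t : List Char) : Bool :=
  let n : Int := s.length
  if s.length ≠ t.length then false
  else if s = t then true
  else
    let p := pvPrefLen s t
    -- the q-loop counts matching characters from the right end; ported as the
    -- common-prefix count of the reversed lists (exact: the same count)
    let q := pvPrefLen s.reverse t.reverse
    (PySem.List.pyRange 0 ((p : Int) + 1) 1).any (fun a =>
      (PySem.List.pyRange 0 ((q : Int) + 1) 1).any (fun b =>
        let smid := PySem.List.slice s (some a) (some (n - b))
        let omid := PySem.List.slice t (some a) (some (n - b))
        PySem.Chars.isIn omid (smid ++ smid)))

def can_form_by_one_cut_insert_alt (shuffled : String) (original : String) : Bool :=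
  pvBCore shuffled.toList original.toList

-- ===== PRECONDITION & SPEC =====
def Spec_can_form_by_one_cut_insert (shuffled : String) (original : String) (out : Bool) : Prop := out = can_form_by_one_cut_insert_alt shuffled original
instance (shuffled : String) (original : String) (out : Bool) : Decidable (Spec_can_form_by_one_cut_insert shuffled original out) := by unfold Spec_can_form_by_one_cut_insert; infer_instance

-- ===== CLAIM (what is proved, stated in full; the proofs are below) =====
def Claim_equal_can_form_by_one_cut_insert : Prop := ∀ (shuffled : String) (original : String), Dom_can_form_by_one_cut_insert shuffled original → Spec_can_form_by_one_cut_insert shuffled original (can_form_by_one_cut_insert shuffled original)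

-- ===== LEMMAS AND PROOFS =====

-- t arises from s by swapping two adjacent blocks (= one cut + reinsert; blocks possibly empty)
def pvSwap (s t : List Char) : Prop :=
  ∃ A U V B : List Char, s = A ++ U ++ V ++ B ∧ t = A ++ V ++ U ++ B

theorem pvSwap_refl (s : List Char) : pvSwap s s := ⟨s, [], [], [], by simp, by simp⟩

theorem pvSwap_length {s t : List Char} (h : pvSwap s t) : s.length = t.length := by
  obtain ⟨A, U, V, B, hs, ht⟩ := h
  subst hs; subst ht; simp; omega

-- ---- pvPrefLen facts ----

theorem pvPrefLen_le_left (s t : List Char) : pvPrefLen s t ≤ s.length := by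
  induction s generalizing t with
  | nil => simp [pvPrefLen]
  | cons a s' ih =>
    cases t with
    | nil => simp [pvPrefLen]
    | cons b t' =>
      by_cases h : a = b
      · simpa [pvPrefLen, h] using ih t'
      · simp [pvPrefLen, h]

theorem pvPrefLen_take_eq (s t : List Char) (a : Nat) (h : a ≤ pvPrefLen s t) :
    s.take a = t.take a := by
  induction s generalizing t a with
  | nil => simp [pvPrefLen] at h; subst h; simp
  | cons x s' ih =>
    cases t with
    | nil => simp [pvPrefLen] at h; subst h; simp
    | cons y t' =>
      by_cases hxy : x = y
      · cases a with
        | zero => simp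
        | succ a' =>
          simp [pvPrefLen, hxy] at h
          simp [List.take_succ_cons, hxy, ih t' a' (by omega)]
      · simp [pvPrefLen, hxy] at h; subst h; simp

theorem pvPrefLen_ge (A s t : List Char) : A.length ≤ pvPrefLen (A ++ s) (A ++ t) := by
  induction A with
  | nil => simp
  | cons a A' ih => simpa [pvPrefLen] using ih

theorem pvDrop_eq (s t : List Char) (b : Nat)
    (hb : b ≤ pvPrefLen s.reverse t.reverse) :
    s.drop (s.length - b) = t.drop (t.length - b) := by
  have h := pvPrefLen_take_eq _ _ b hb
  rw [List.take_reverse, List.take_reverse] at h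
  exact List.reverse_injective h

theorem pvSum_lt (s t : List Char) (hlen : s.length = t.length) (hne : s ≠ t) :
    pvPrefLen s t + pvPrefLen s.reverse t.reverse < s.length := by
  by_contra hcon
  rw [not_lt] at hcon
  apply hne
  set p := pvPrefLen s t with hp
  set q := pvPrefLen s.reverse t.reverse with hq
  have hple : p ≤ s.length := pvPrefLen_le_left s t
  have h1 : s.length - q ≤ p := by omega
  have htp : s.take p = t.take p := pvPrefLen_take_eq s t p le_rfl
  have hdq : s.drop (s.length - q) = t.drop (t.length - q) := pvDrop_eq s t q le_rfl
  have htake : s.take (s.length - q) = t.take (s.length - q) := by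
    have hs' : s.take (s.length - q) = (s.take p).take (s.length - q) := by
      rw [List.take_take, Nat.min_eq_left h1]
    have ht' : t.take (s.length - q) = (t.take p).take (s.length - q) := by
      rw [List.take_take, Nat.min_eq_left h1]
    rw [hs', ht', htp]
  calc s = s.take (s.length - q) ++ s.drop (s.length - q) := (List.take_append_drop _ _).symm
    _ = t.take (s.length - q) ++ t.drop (t.length - q) := by rw [htake, hdq]
    _ = t := by rw [hlen, List.take_append_drop]

-- ---- rotation vs infix-of-doubled ----

theorem pvRot_of_infix (u v : List Char) (hlen : v.length = u.length) (h : v <:+: u ++ u) :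
    ∃ k, k ≤ u.length ∧ v = u.drop k ++ u.take k := by
  obtain ⟨w, z, hwz⟩ := h
  have hlw : w.length + v.length + z.length = u.length + u.length := by
    have h := congrArg List.length hwz
    simp at h
    omega
  have hk : w.length ≤ u.length := by omega
  refine ⟨w.length, hk, ?_⟩
  have e1 : ((u ++ u).drop w.length).take v.length = v := by
    rw [hwz.symm, List.append_assoc, List.drop_left, List.take_left]
  have e2 : ((u ++ u).drop w.length).take v.length = u.drop w.length ++ u.take w.length := by
    rw [List.drop_append_of_le_length hk, List.take_append, hlen]
    have hdl : (u.drop w.length).length = u.length - w.length := by simp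
    rw [List.take_of_length_le (by omega), hdl]
    congr 1
    congr 1
    omega
  rw [← e1, e2]

theorem pvInfix_of_rot (U V : List Char) : (V ++ U) <:+: (U ++ V) ++ (U ++ V) :=
  ⟨U, V, by simp⟩

-- ---- the move lemma: a successful candidate of A yields a swap decomposition ----

theorem pvMove_swap (s t : List Char) (a c k : Nat) (hac : a ≤ c) (hc : c ≤ s.length)
    (heq : (s.take a ++ s.drop c).take k ++ (s.drop a).take (c - a) ++ (s.take a ++ s.drop c).drop k = t) :
    pvSwap s t := by
  have ha : a ≤ s.length := le_trans hac hc
  have hlta : (s.take a).length = a := by simp; omega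
  have e2 : s.take c = s.take a ++ (s.drop a).take (c - a) := by
    conv_lhs => rw [show c = a + (c - a) from by omega]
    rw [List.take_add]
  by_cases hka : k ≤ a
  · have h1 : (s.take a ++ s.drop c).take k = s.take k := by
      rw [List.take_append_of_le_length (by omega), List.take_take, Nat.min_eq_left hka]
    have h2 : (s.take a ++ s.drop c).drop k = (s.drop k).take (a - k) ++ s.drop c := by
      rw [List.drop_append_of_le_length (by omega), List.drop_take]
    have e1 : s.take a = s.take k ++ (s.drop k).take (a - k) := by
      conv_lhs => rw [show a = k + (a - k) from by omega]
      rw [List.take_add]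
    refine ⟨s.take k, (s.drop k).take (a - k), (s.drop a).take (c - a), s.drop c, ?_, ?_⟩
    · conv_lhs => rw [← List.take_append_drop c s, e2, e1]
    · rw [← heq, h1, h2]
      simp [List.append_assoc]
  · rw [Nat.not_le] at hka
    have h1 : (s.take a ++ s.drop c).take k = s.take a ++ (s.drop c).take (k - a) := by
      rw [List.take_append, List.take_take, Nat.min_eq_right (by omega), hlta]
    have h2 : (s.take a ++ s.drop c).drop k = (s.drop c).drop (k - a) := by
      rw [List.drop_append, hlta, List.drop_eq_nil_of_le (by omega), List.nil_append]
    refine ⟨s.take a, (s.drop a).take (c - a), (s.drop c).take (k - a), (s.drop c).drop (k - a), ?_, ?_⟩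
    · conv_lhs => rw [← List.take_append_drop c s, e2, ← List.take_append_drop (k - a) (s.drop c)]
      simp [List.append_assoc]
    · conv_lhs => rw [← heq, h1, h2]

theorem pvACore_iff (s t : List Char) : pvACore s t = true ↔ pvSwap s t := by
  constructor
  · intro h
    by_cases hst : s = t
    · exact hst ▸ pvSwap_refl s
    · simp only [pvACore, if_neg hst, List.any_eq_true, decide_eq_true_eq,
        PySem.List.mem_pyRange_one] at h
      obtain ⟨l, ⟨hl0, hlN⟩, r, ⟨hrl, hrN⟩, i, ⟨hi0, hiM⟩, heq⟩ := h
      have hla : l = ((l.toNat : Nat) : Int) := by omega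
      have hra : r + 1 = ((r.toNat + 1 : Nat) : Int) := by omega
      have hia : i = ((i.toNat : Nat) : Int) := by omega
      rw [hla, hia, hra, PySem.List.slice_natCast, PySem.List.slice_to_natCast,
        PySem.List.slice_from_natCast, PySem.List.slice_to_natCast,
        PySem.List.slice_from_natCast] at heq
      exact pvMove_swap s t l.toNat (r.toNat + 1) i.toNat (by omega) (by omega) heq
  · intro hsw
    by_cases hst : s = t
    · simp [pvACore, hst]
    · obtain ⟨A, U, V, B, hs, ht⟩ := hsw
      have hU : U ≠ [] := by
        rintro rfl; exact hst (by rw [hs, ht]; simp)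
      have hV : V ≠ [] := by
        rintro rfl; exact hst (by rw [hs, ht]; simp)
      have hNU : 0 < U.length := List.length_pos_of_ne_nil hU
      have hNV : 0 < V.length := List.length_pos_of_ne_nil hV
      have hsl : s.length = A.length + U.length + V.length + B.length := by
        rw [hs]; simp; omega
      simp only [pvACore, if_neg hst, List.any_eq_true, decide_eq_true_eq,
        PySem.List.mem_pyRange_one]
      refine ⟨(A.length : Int), ⟨by omega, by omega⟩,
        ((A.length + U.length - 1 : Nat) : Int), ⟨by omega, by omega⟩, ?_⟩
      have hr1 : ((A.length + U.length - 1 : Nat) : Int) + 1 = ((A.length + U.length : Nat) : Int) := by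
        omega
      rw [hr1, PySem.List.slice_natCast, PySem.List.slice_to_natCast, PySem.List.slice_from_natCast]
      have hdropA : s.drop A.length = U ++ (V ++ B) := by
        rw [hs, List.append_assoc, List.append_assoc, List.drop_left]
      have hseg : (s.drop A.length).take (A.length + U.length - A.length) = U := by
        rw [hdropA, Nat.add_sub_cancel_left, List.take_left]
      have htakeA : s.take A.length = A := by
        rw [hs, List.append_assoc, List.append_assoc, List.take_left]
      have hdropAU : s.drop (A.length + U.length) = V ++ B := by
        rw [hs, show A ++ U ++ V ++ B = (A ++ U) ++ (V ++ B) from by simp,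
          List.drop_left' (by simp)]
      rw [hseg, htakeA, hdropAU]
      refine ⟨((A.length + V.length : Nat) : Int), ⟨by omega,
        by simp only [List.length_append]; push_cast; omega⟩, ?_⟩
      rw [PySem.List.slice_to_natCast, PySem.List.slice_from_natCast]
      have htk : (A ++ (V ++ B)).take (A.length + V.length) = A ++ V := by
        rw [show A ++ (V ++ B) = (A ++ V) ++ B from by simp, List.take_left' (by simp)]
      have hdr : (A ++ (V ++ B)).drop (A.length + V.length) = B := by
        rw [show A ++ (V ++ B) = (A ++ V) ++ B from by simp, List.drop_left' (by simp)]
      rw [htk, hdr, ht]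

theorem pvBCore_iff (s t : List Char) : pvBCore s t = true ↔ pvSwap s t := by
  constructor
  · intro h
    by_cases hlen : s.length = t.length
    · by_cases hst : s = t
      · exact hst ▸ pvSwap_refl s
      · simp only [pvBCore, if_neg hst, ne_eq, hlen, not_true_eq_false, if_false,
          List.any_eq_true, PySem.List.mem_pyRange_one] at h
        obtain ⟨a, ⟨ha0, ha1⟩, b, ⟨hb0, hb1⟩, hin⟩ := h
        have hpq := pvSum_lt s t hlen hst
        set an := a.toNat with han
        set bn := b.toNat with hbn
        have hap : an ≤ pvPrefLen s t := by omega
        have hbq : bn ≤ pvPrefLen s.reverse t.reverse := by omega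
        have hmn : an + bn < s.length := by omega
        set m := s.length - bn - an with hm
        have haa : a = ((an : Nat) : Int) := by omega
        have hnb : (t.length : Int) - b = ((an + m : Nat) : Int) := by omega
        rw [haa, hnb, PySem.List.slice_natCast, PySem.List.slice_natCast,
          PySem.Chars.isIn_iff_infix] at hin
        rw [show an + m - an = m from by omega] at hin
        set u := (s.drop an).take m with hu
        set v := (t.drop an).take m with hv
        have hul : u.length = m := by rw [hu]; simp; omega
        have hvl : v.length = m := by rw [hv]; simp; omega
        obtain ⟨k, hk, hrot⟩ := pvRot_of_infix u v (by rw [hul, hvl]) hin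
        have htA : s.take an = t.take an := pvPrefLen_take_eq s t an hap
        have hdB : s.drop (an + m) = t.drop (an + m) := by
          have h1 := pvDrop_eq s t bn hbq
          rw [show s.length - bn = an + m from by omega] at h1
          rw [← hlen] at h1
          rw [show s.length - bn = an + m from by omega] at h1
          exact h1
        have hsu : s.take (an + m) = s.take an ++ u := by rw [hu, List.take_add]
        have htv : t.take (an + m) = t.take an ++ v := by rw [hv, List.take_add]
        refine ⟨s.take an, u.take k, u.drop k, s.drop (an + m), ?_, ?_⟩
        · have h1 : u.take k ++ u.drop k = u := List.take_append_drop _ _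
          calc s = s.take (an + m) ++ s.drop (an + m) := (List.take_append_drop _ _).symm
            _ = s.take an ++ u ++ s.drop (an + m) := by rw [hsu]
            _ = s.take an ++ (u.take k ++ u.drop k) ++ s.drop (an + m) := by rw [h1]
            _ = _ := by simp [List.append_assoc]
        · calc t = t.take (an + m) ++ t.drop (an + m) := (List.take_append_drop _ _).symm
            _ = t.take an ++ v ++ t.drop (an + m) := by rw [htv]
            _ = s.take an ++ (u.drop k ++ u.take k) ++ s.drop (an + m) := by
                rw [← htA, ← hdB, hrot]
            _ = _ := by simp [List.append_assoc]
    · exfalso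
      simp only [pvBCore, ne_eq, hlen, not_false_eq_true, if_true] at h
      exact Bool.false_ne_true h
  · intro hsw
    have hlen := pvSwap_length hsw
    by_cases hst : s = t
    · subst hst; simp [pvBCore]
    · obtain ⟨A, U, V, B, hs, ht⟩ := hsw
      have hsl : s.length = A.length + U.length + V.length + B.length := by
        rw [hs]; simp; omega
      have hp : A.length ≤ pvPrefLen s t := by
        rw [show s = A ++ (U ++ V ++ B) from by rw [hs]; simp,
          show t = A ++ (V ++ U ++ B) from by rw [ht]; simp]
        exact pvPrefLen_ge A _ _
      have hq : B.length ≤ pvPrefLen s.reverse t.reverse := by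
        have e1 : s.reverse = B.reverse ++ (V.reverse ++ U.reverse ++ A.reverse) := by
          rw [hs]; simp
        have e2 : t.reverse = B.reverse ++ (U.reverse ++ V.reverse ++ A.reverse) := by
          rw [ht]; simp
        rw [e1, e2]
        simpa using pvPrefLen_ge B.reverse _ _
      simp only [pvBCore, ne_eq, hlen, not_true_eq_false, if_false, if_neg hst,
        List.any_eq_true, PySem.List.mem_pyRange_one]
      refine ⟨(A.length : Int), ⟨by omega, by omega⟩, (B.length : Int), ⟨by omega, by omega⟩, ?_⟩
      have hnb : (t.length : Int) - (B.length : Int) = ((A.length + (U.length + V.length) : Nat) : Int) := by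
        omega
      rw [hnb, PySem.List.slice_natCast, PySem.List.slice_natCast,
        show A.length + (U.length + V.length) - A.length = U.length + V.length from by omega]
      have hds : s.drop A.length = U ++ (V ++ B) := by
        rw [hs, List.append_assoc, List.append_assoc, List.drop_left]
      have hdt : t.drop A.length = V ++ (U ++ B) := by
        rw [ht, List.append_assoc, List.append_assoc, List.drop_left]
      have hts : (s.drop A.length).take (U.length + V.length) = U ++ V := by
        rw [hds, show U ++ (V ++ B) = (U ++ V) ++ B from by simp, List.take_left' (by simp)]
      have htt : (t.drop A.length).take (U.length + V.length) = V ++ U := by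
        rw [hdt, show V ++ (U ++ B) = (V ++ U) ++ B from by simp,
          List.take_left' (by simp [Nat.add_comm])]
      rw [hts, htt, PySem.Chars.isIn_iff_infix]
      exact pvInfix_of_rot U V

-- ===== VERDICT (by name: the statement is the Claim_ definition above) =====
theorem can_form_by_one_cut_insert_spec : Claim_equal_can_form_by_one_cut_insert := by
  intro s t _
  unfold Spec_can_form_by_one_cut_insert can_form_by_one_cut_insert can_form_by_one_cut_insert_alt
  exact Bool.eq_iff_iff.mpr ((pvACore_iff _ _).trans (pvBCore_iff _ _).symm)
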